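-- pv_equiv track=rewrite | github.com/vosslab/biology-problems | consensus_sequence_easy.py | makeHtmlRow
-- ===== SOURCE A (Python) =====
-- separate = 3
--
-- def colorNucleotide(nt):
-- 	adenine = ' bgcolor="#e6ffe6"' #green
-- 	cytosine = ' bgcolor="#e6f3ff"' #blue
-- 	thymine = ' bgcolor="#ffe6e6"' #red
-- 	guanine = ' bgcolor="#f2f2f2"' #black
-- 	uracil = ' bgcolor="#f3e6ff"' #purple
-- 	if nt == 'A':
-- 		return adenine
-- 	elif nt == 'C':
-- 		return cytosine
-- 	elif nt == 'G':
-- 		return guanine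
-- 	elif nt == 'T':
-- 		return thymine
-- 	elif nt == 'U':
-- 		return thymine
-- 	return ''
--
-- def makeHtmlRow(seq):
-- 	htmlrow = ""
-- 	htmlrow += "<tr>"
-- 	for i in range(len(seq)):
-- 		if i > 0 and i % separate == 0:
-- 			htmlrow += "<td>&nbsp;,&nbsp;</td> "
-- 		nt = seq[i]
-- 		htmlrow += "<td {1}>&nbsp;{0}&nbsp;</td> ".format(nt, colorNucleotide(nt))
-- 	return htmlrow
-- ===== SOURCE B (Python) =====
-- separate = 3
--
-- COLORS = {
--     'A': ' bgcolor="#e6ffe6"',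
--     'C': ' bgcolor="#e6f3ff"',
--     'G': ' bgcolor="#f2f2f2"',
--     'T': ' bgcolor="#ffe6e6"',
--     'U': ' bgcolor="#ffe6e6"',
-- }
--
-- def colorNucleotide(nt):
--     return COLORS.get(nt, '')
--
-- def makeHtmlRow(seq):
--     cells = ["<td {}>&nbsp;{}&nbsp;</td> ".format(colorNucleotide(nt), nt) for nt in seq]
--     groups = ["".join(cells[i:i + separate]) for i in range(0, len(cells), separate)]
--     return "<tr>" + "<td>&nbsp;,&nbsp;</td> ".join(groups)
-- ===== Notes on version B (the rewrite author's own statement) =====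
-- stated objective: alternative
-- what changed: Replaced A's single index loop with its modular-separator branch by a chunk-then-join decomposition: format each nucleotide into a cell, slice the cells into groups of 3, join the groups with the separator cell; colorNucleotide becomes a dict lookup.
import Mathlib
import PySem

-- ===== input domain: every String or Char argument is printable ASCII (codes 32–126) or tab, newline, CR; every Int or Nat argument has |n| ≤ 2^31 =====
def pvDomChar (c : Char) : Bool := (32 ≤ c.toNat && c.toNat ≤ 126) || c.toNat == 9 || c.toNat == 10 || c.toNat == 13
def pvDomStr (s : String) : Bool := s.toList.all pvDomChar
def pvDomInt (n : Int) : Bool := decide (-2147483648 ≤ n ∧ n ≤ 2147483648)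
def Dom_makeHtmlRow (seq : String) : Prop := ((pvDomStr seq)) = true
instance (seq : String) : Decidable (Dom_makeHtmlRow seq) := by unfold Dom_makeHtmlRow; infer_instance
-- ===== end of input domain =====

-- B replaces A's index loop with its modular-separator branch by a chunk-then-join
-- decomposition (groups of 3 cells joined by the separator cell); same output, same cost.

-- ===== PORT A =====
def separate : Int := 3

def colorNucleotideA (nt : Char) : List Char :=
  let adenine := " bgcolor=\"#e6ffe6\"".toList
  let cytosine := " bgcolor=\"#e6f3ff\"".toList
  let thymine := " bgcolor=\"#ffe6e6\"".toList
  let guanine := " bgcolor=\"#f2f2f2\"".toList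
  let _uracil := " bgcolor=\"#f3e6ff\"".toList  -- assigned but unreachable in A ('U' returns thymine)
  if nt = 'A' then adenine
  else if nt = 'C' then cytosine
  else if nt = 'G' then guanine
  else if nt = 'T' then thymine
  else if nt = 'U' then thymine
  else []

-- "<td {1}>&nbsp;{0}&nbsp;</td> ".format(nt, colorNucleotide(nt))
def cellA (nt : Char) : List Char :=
  "<td ".toList ++ colorNucleotideA nt ++ ">&nbsp;".toList ++ [nt] ++ "&nbsp;</td> ".toList

def makeHtmlRow (seq : String) : String :=
  String.ofList ((PySem.List.enumerate seq.toList).foldl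
    (fun htmlrow p =>
      htmlrow ++
        (if 0 < p.1 ∧ PySem.Int.mod p.1 separate = 0 then "<td>&nbsp;,&nbsp;</td> ".toList else []) ++
        cellA p.2)
    "<tr>".toList)

-- ===== PORT B =====
def colorsB : PySem.Dict Char (List Char) :=
  PySem.Dict.ofList
    [('A', " bgcolor=\"#e6ffe6\"".toList),
     ('C', " bgcolor=\"#e6f3ff\"".toList),
     ('G', " bgcolor=\"#f2f2f2\"".toList),
     ('T', " bgcolor=\"#ffe6e6\"".toList),
     ('U', " bgcolor=\"#ffe6e6\"".toList)]

def colorNucleotideB (nt : Char) : List Char := PySem.Dict.getD colorsB nt []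

def cellB (nt : Char) : List Char :=
  "<td ".toList ++ colorNucleotideB nt ++ ">&nbsp;".toList ++ [nt] ++ "&nbsp;</td> ".toList

-- cells[i:i+3] for i in range(0, len, 3): consecutive chunks of 3
def chunksB (l : List Char) : List (List Char) :=
  if l = [] then [] else l.take 3 :: chunksB (l.drop 3)
termination_by l.length
decreasing_by
  rename_i h
  have : l.length ≠ 0 := fun hl => h (List.eq_nil_of_length_eq_zero hl)
  simp [List.length_drop]; omega

def makeHtmlRow_alt (seq : String) : String :=
  String.ofList ("<tr>".toList ++
    PySem.Chars.join "<td>&nbsp;,&nbsp;</td> ".toList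
      ((chunksB seq.toList).map (fun g => PySem.Chars.join [] (g.map cellB))))

-- ===== PRECONDITION & SPEC =====
def Spec_makeHtmlRow (seq : String) (out : String) : Prop := out = makeHtmlRow_alt seq
instance (seq : String) (out : String) : Decidable (Spec_makeHtmlRow seq out) := by unfold Spec_makeHtmlRow; infer_instance

-- ===== CLAIM (what is proved, stated in full; the proofs are below) =====
def Claim_equal_makeHtmlRow : Prop := ∀ (seq : String), Dom_makeHtmlRow seq → Spec_makeHtmlRow seq (makeHtmlRow seq)

-- ===== LEMMAS AND PROOFS =====

lemma colorsB_mk : colorsB = PySem.Dict.mk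
    [('A', " bgcolor=\"#e6ffe6\"".toList),
     ('C', " bgcolor=\"#e6f3ff\"".toList),
     ('G', " bgcolor=\"#f2f2f2\"".toList),
     ('T', " bgcolor=\"#ffe6e6\"".toList),
     ('U', " bgcolor=\"#ffe6e6\"".toList)] := by decide

lemma color_eq : colorNucleotideB = colorNucleotideA := by
  funext c
  by_cases hA : c = 'A'
  · subst hA; decide
  by_cases hC : c = 'C'
  · subst hC; decide
  by_cases hG : c = 'G'
  · subst hG; decide
  by_cases hT : c = 'T'
  · subst hT; decide
  by_cases hU : c = 'U'
  · subst hU; decide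
  · have hA' : ('A' == c) = false := beq_eq_false_iff_ne.mpr (fun h => hA h.symm)
    have hC' : ('C' == c) = false := beq_eq_false_iff_ne.mpr (fun h => hC h.symm)
    have hG' : ('G' == c) = false := beq_eq_false_iff_ne.mpr (fun h => hG h.symm)
    have hT' : ('T' == c) = false := beq_eq_false_iff_ne.mpr (fun h => hT h.symm)
    have hU' : ('U' == c) = false := beq_eq_false_iff_ne.mpr (fun h => hU h.symm)
    simp [colorNucleotideB, colorsB_mk, PySem.Dict.getD,
      PySem.Dict.get?, colorNucleotideA, hA, hC, hG, hT, hU, hA', hC', hG', hT', hU']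

lemma cell_eq : cellB = cellA := by
  funext c; simp [cellB, cellA, color_eq]

-- the separator cell, abbreviated for the proofs
def sepL : List Char := "<td>&nbsp;,&nbsp;</td> ".toList

-- A's loop body as a named function (definitionally the lambda inside makeHtmlRow)
def stepA (htmlrow : List Char) (p : Int × Char) : List Char :=
  htmlrow ++ (if 0 < p.1 ∧ PySem.Int.mod p.1 separate = 0 then sepL else []) ++ cellA p.2

lemma mod_sep (k : Int) : PySem.Int.mod k separate = k % 3 := by
  show PySem.Int.mod k 3 = k % 3
  exact PySem.Int.mod_eq_emod_of_pos (by norm_num)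

lemma join_cons (sep : List Char) (g0 : List Char) (gs : List (List Char)) :
    PySem.Chars.join sep (g0 :: gs) = g0 ++ gs.flatMap (fun g => sep ++ g) := by
  induction gs generalizing g0 with
  | nil => simp [PySem.Chars.join_singleton]
  | cons g1 gs ih =>
      rw [PySem.Chars.join_cons_cons, ih]
      simp

lemma join_nil_map (g : List Char) : PySem.Chars.join [] (g.map cellA) = g.flatMap cellA := by
  cases g with
  | nil => simp [PySem.Chars.join_nil]
  | cons a g =>
      rw [List.map_cons, List.flatMap_cons, join_cons]
      simp [List.flatMap_def, Function.comp_def]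

lemma tail_lemma (l : List Char) : ∀ (k : Int) (acc : List Char),
    0 < k → PySem.Int.mod k separate = 0 →
    (PySem.List.enumerate l k).foldl stepA acc
      = acc ++ (chunksB l).flatMap (fun g => sepL ++ g.flatMap cellA) := by
  induction l using chunksB.induct with
  | case1 => intro k acc _ _; simp [chunksB, PySem.List.enumerate_nil]
  | case2 l hne ih =>
      intro k acc hk hmod
      rw [mod_sep] at hmod
      have h1 : ¬ ((k + 1) % 3 = 0) := by omega
      have h2 : ¬ ((k + 1 + 1) % 3 = 0) := by omega
      rcases l with _ | ⟨a, l⟩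
      · exact absurd rfl hne
      rcases l with _ | ⟨b, l⟩
      · rw [chunksB]
        simp [PySem.List.enumerate_cons, PySem.List.enumerate_nil, stepA, mod_sep,
          hk, hmod, chunksB]
      rcases l with _ | ⟨c, r⟩
      · rw [chunksB]
        simp [PySem.List.enumerate_cons, PySem.List.enumerate_nil, stepA, mod_sep,
          hk, hmod, h1, chunksB]
      · rw [chunksB]
        simp only [List.take, List.drop, if_neg (by simp : ¬ (a :: b :: c :: r = []))]
        rw [PySem.List.enumerate_cons, PySem.List.enumerate_cons, PySem.List.enumerate_cons]
        simp only [List.foldl_cons]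
        have e3 : k + 1 + 1 + 1 = k + 3 := by ring
        simp only [List.drop_succ_cons, List.drop_zero] at ih
        rw [e3, ih (k + 3) _ (by omega) (by rw [mod_sep]; omega)]
        simp [stepA, mod_sep, hk, hmod, h1, h2]

lemma head_lemma (l : List Char) (acc : List Char) :
    (PySem.List.enumerate l).foldl stepA acc
      = acc ++ PySem.Chars.join sepL ((chunksB l).map (fun g => PySem.Chars.join [] (g.map cellA))) := by
  rcases l with _ | ⟨a, l⟩
  · simp [chunksB, PySem.List.enumerate_nil, PySem.Chars.join_nil]
  rcases l with _ | ⟨b, l⟩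
  · rw [chunksB]
    simp [PySem.List.enumerate_cons, PySem.List.enumerate_nil, stepA, mod_sep, chunksB,
      PySem.Chars.join_singleton, join_nil_map]
  rcases l with _ | ⟨c, r⟩
  · rw [chunksB]
    simp [PySem.List.enumerate_cons, PySem.List.enumerate_nil, stepA, mod_sep, chunksB,
      PySem.Chars.join_singleton, join_nil_map]
  · rw [chunksB]
    simp only [List.take, List.drop, if_neg (by simp : ¬ (a :: b :: c :: r = []))]
    rw [PySem.List.enumerate_cons, PySem.List.enumerate_cons, PySem.List.enumerate_cons]
    simp only [List.foldl_cons]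
    have e3 : (0 : Int) + 1 + 1 + 1 = 3 := by norm_num
    rw [e3, tail_lemma r 3 _ (by norm_num) (by rw [mod_sep]; norm_num)]
    rw [List.map_cons, join_cons]
    simp [stepA, mod_sep, join_nil_map, List.flatMap_map, join_cons]

-- ===== VERDICT (by name: the statement is the Claim_ definition above) =====
theorem makeHtmlRow_spec : Claim_equal_makeHtmlRow := by
  intro seq _
  show makeHtmlRow seq = makeHtmlRow_alt seq
  unfold makeHtmlRow makeHtmlRow_alt
  rw [show (fun (htmlrow : List Char) (p : Int × Char) =>
        htmlrow ++
          (if 0 < p.1 ∧ PySem.Int.mod p.1 separate = 0 then "<td>&nbsp;,&nbsp;</td> ".toList else []) ++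
          cellA p.2) = stepA from rfl]
  rw [head_lemma, cell_eq]
  rfl
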